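-- pv_equiv track=rewrite | github.com/insatomcat/po | svgenerator/parse_ref_pkt.py | read_ber_tag_len
-- ===== SOURCE A (Python) =====
-- def read_ber_tag_len(data, off):
--     """Retourne (tag, length, next_offset)."""
--     if off >= len(data):
--         return None, 0, off
--     tag = data[off]
--     off += 1
--     L = data[off]
--     off += 1
--     if L & 0x80:
--         n = L & 0x7F
--         L = 0
--         for _ in range(n):
--             L = (L << 8) | data[off]
--             off += 1
--     return tag, L, off
-- ===== SOURCE B (Python) =====
-- def read_ber_tag_len(data, off):
--     """Retourne (tag, length, next_offset)."""
--     if off >= len(data):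
--         return None, 0, off
--     tag = data[off]
--     L = data[off + 1]
--     off += 2
--     if L & 0x80:
--         n = L & 0x7F
--         if off + n > len(data):
--             raise IndexError("truncated BER length field")
--         L = int.from_bytes(bytes(data[off:off + n]), 'big')
--         off += n
--     return tag, L, off
-- ===== Notes on version B (the rewrite author's own statement) =====
-- stated objective: idiomatic
-- what changed: The long-form length is computed in one shot with int.from_bytes over a slice (with an explicit truncation guard) instead of A's shift-and-OR accumulation loop that mutates the offset byte by byte.
-- outside the precondition, e.g. on read_ber_tag_len([129, 129, 7], -3): A returns (129, 7, 0), B returns (129, 0, 0); on read_ber_tag_len([0, 129, -1], 0): A returns (0, -1, 3), B raises ValueError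
import Mathlib
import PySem

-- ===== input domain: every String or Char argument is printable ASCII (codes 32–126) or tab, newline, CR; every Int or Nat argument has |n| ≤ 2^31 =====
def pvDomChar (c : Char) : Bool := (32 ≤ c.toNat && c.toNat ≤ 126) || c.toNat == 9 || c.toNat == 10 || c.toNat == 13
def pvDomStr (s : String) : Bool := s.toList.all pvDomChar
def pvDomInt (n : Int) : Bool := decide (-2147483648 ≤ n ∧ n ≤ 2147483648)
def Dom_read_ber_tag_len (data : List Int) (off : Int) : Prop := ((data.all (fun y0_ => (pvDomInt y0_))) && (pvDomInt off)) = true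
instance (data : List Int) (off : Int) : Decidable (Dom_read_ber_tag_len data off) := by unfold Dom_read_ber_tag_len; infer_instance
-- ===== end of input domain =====

-- B replaces A's shift-and-OR loop (which mutates the offset byte by byte) with a one-shot
-- big-endian conversion of the sliced length field, guarded by an explicit truncation check
-- (objective: idiomatic).

-- ===== PORT A =====
def read_ber_tag_len (data : List Int) (off : Int) : Option Int × Int × Int :=
  if (data.length : Int) ≤ off then (none, 0, off)
  else
    let tag := PySem.List.pyGetD data off 0
    let L0 := PySem.List.pyGetD data (off + 1) 0
    if PySem.Int.band L0 128 ≠ 0 then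
      let n := (PySem.Int.band L0 127).toNat
      let st := (List.range n).foldl
        (fun (st : Int × Int) _ =>
          (PySem.Int.bor (st.1 <<< (8 : Nat)) (PySem.List.pyGetD data st.2 0), st.2 + 1))
        (0, off + 2)
      (some tag, st.1, st.2)
    else (some tag, L0, off + 2)

-- ===== PORT B =====
def read_ber_tag_len_alt (data : List Int) (off : Int) : Option Int × Int × Int :=
  if (data.length : Int) ≤ off then (none, 0, off)
  else
    let tag := PySem.List.pyGetD data off 0
    let L := PySem.List.pyGetD data (off + 1) 0
    if PySem.Int.band L 128 ≠ 0 then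
      let n := PySem.Int.band L 127
      if (data.length : Int) < off + 2 + n then (none, 0, off)  -- B raises IndexError here (outside Pre_)
      else
        let chunk := PySem.List.slice data (some (off + 2)) (some (off + 2 + n))
        -- int.from_bytes(chunk, 'big'), ported as its big-endian fold
        (some tag, chunk.foldl (fun a b => a * 256 + b) 0, off + 2 + n)
    else (some tag, L, off + 2)

-- ===== PRECONDITION & SPEC =====
-- Pre_ excludes inputs on which A raises IndexError (truncated header or length field), and —
-- narrowing inputs on which A still returns — long-form reads at a negative offset (A's value
-- there comes from Python's negative-index wraparound, which B's slice does not reproduce) and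
-- long-form length fields containing non-byte values (B's bytes() raises ValueError there).
def Pre_read_ber_tag_len (data : List Int) (off : Int) : Prop :=
  (data.length : Int) ≤ off ∨
  (PySem.Raise.InRange data.length off ∧ PySem.Raise.InRange data.length (off + 1) ∧
    (PySem.Int.band (PySem.List.pyGetD data (off + 1) 0) 128 ≠ 0 →
      0 ≤ off ∧
      off + 2 + PySem.Int.band (PySem.List.pyGetD data (off + 1) 0) 127 ≤ (data.length : Int) ∧
      ∀ b ∈ PySem.List.slice data (some (off + 2))
          (some (off + 2 + PySem.Int.band (PySem.List.pyGetD data (off + 1) 0) 127)),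
        0 ≤ b ∧ b < 256))
instance (data : List Int) (off : Int) : Decidable (Pre_read_ber_tag_len data off) := by
  unfold Pre_read_ber_tag_len; infer_instance

def pvWitness_read_ber_tag_len : List Int × Int := ([2, 129, 3, 5], 0)

def Spec_read_ber_tag_len (data : List Int) (off : Int) (out : Option Int × Int × Int) : Prop := out = read_ber_tag_len_alt data off
instance (data : List Int) (off : Int) (out : Option Int × Int × Int) : Decidable (Spec_read_ber_tag_len data off out) := by unfold Spec_read_ber_tag_len; infer_instance

-- ===== CLAIM (what is proved, stated in full; the proofs are below) =====
def Claim_equal_read_ber_tag_len : Prop := ∀ (data : List Int) (off : Int), Dom_read_ber_tag_len data off → Pre_read_ber_tag_len data off → Spec_read_ber_tag_len data off (read_ber_tag_len data off)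

-- ===== LEMMAS AND PROOFS =====

lemma pv_or_add (a b : Nat) (hb : b < 256) : (a * 256) ||| b = a * 256 + b := by
  have h256 : (256 : Nat) = 2 ^ 8 := by norm_num
  apply Nat.eq_of_testBit_eq
  intro i
  rw [Nat.testBit_lor]
  rcases Nat.lt_or_ge i 8 with h | h
  · have h1 : (a * 256).testBit i = false := by
      rw [h256, Nat.mul_comm, Nat.testBit_two_pow_mul]
      simp [h]
    have h2 : (a * 256 + b).testBit i = b.testBit i := by
      rw [h256, Nat.mul_comm, Nat.testBit_two_pow_mul_add _ hb]
      simp [h]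
    simp [h1, h2]
  · have h1 : b.testBit i = false := by
      apply Nat.testBit_lt_two_pow
      calc b < 2 ^ 8 := by omega
        _ ≤ 2 ^ i := Nat.pow_le_pow_right (by norm_num) h
    have h2 : (a * 256 + b).testBit i = (a * 256).testBit i := by
      rw [h256, Nat.mul_comm, Nat.testBit_two_pow_mul_add _ hb, Nat.testBit_two_pow_mul]
      simp [Nat.not_lt.mpr h]
      exact fun _ => h
    simp [h1, h2]

lemma pv_bor_shift (a b : Int) (ha : 0 ≤ a) (hb0 : 0 ≤ b) (hb : b < 256) :
    PySem.Int.bor (a <<< (8 : Nat)) b = a * 256 + b := by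
  have hs : a <<< (8 : Nat) = a * 256 := by rw [Int.shiftLeft_eq]; norm_num
  rw [hs, PySem.Int.bor_of_nonneg (by positivity) hb0]
  have h1 : (a * 256).toNat = a.toNat * 256 := by
    rcases Int.eq_ofNat_of_zero_le ha with ⟨m, rfl⟩
    have h2 : ((m : Int) * 256) = ((m * 256 : Nat) : Int) := by push_cast; ring
    rw [h2, Int.toNat_natCast, Int.toNat_natCast]
  rw [h1, pv_or_add _ _ (by omega)]
  push_cast
  omega

lemma pv_fold_nonneg : ∀ (chunk : List Int) (acc : Int), 0 ≤ acc → (∀ b ∈ chunk, 0 ≤ b) →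
    0 ≤ chunk.foldl (fun a b => a * 256 + b) acc := by
  intro chunk
  induction chunk with
  | nil => intro acc h _; simpa using h
  | cons c cs ih =>
    intro acc h hb
    simp only [List.foldl_cons]
    have hc := hb c (by simp)
    exact ih _ (by nlinarith) (fun b hb' => hb b (by simp [hb']))

lemma pv_loop_eq (data : List Int) : ∀ (n s : Nat) (acc : Int), 0 ≤ acc →
    s + n ≤ data.length →
    (∀ b ∈ (data.drop s).take n, 0 ≤ b ∧ b < 256) →
    (List.range n).foldl
      (fun (st : Int × Int) _ =>
        (PySem.Int.bor (st.1 <<< (8 : Nat)) (PySem.List.pyGetD data st.2 0), st.2 + 1))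
      (acc, (s : Int))
    = (((data.drop s).take n).foldl (fun a b => a * 256 + b) acc, (s : Int) + n) := by
  intro n
  induction n with
  | zero => intro s acc _ _ _; simp
  | succ n ih =>
    intro s acc hacc hlen hbytes
    have hlt : s + n < data.length := by omega
    have htake : (data.drop s).take (n + 1) = (data.drop s).take n ++ [data[s + n]] := by
      rw [List.take_add_one]
      congr 1
      rw [List.getElem?_drop]
      simp [List.getElem?_eq_getElem hlt]
    have hbytes' : ∀ b ∈ (data.drop s).take n, 0 ≤ b ∧ b < 256 := by
      intro b hb
      exact hbytes b (by rw [htake]; exact List.mem_append_left _ hb)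
    have hlast : 0 ≤ data[s + n] ∧ data[s + n] < 256 := by
      apply hbytes
      rw [htake]; exact List.mem_append_right _ (by simp)
    rw [List.range_succ, List.foldl_append, ih s acc hacc (by omega) hbytes']
    simp only [List.foldl_cons, List.foldl_nil]
    have hget : PySem.List.pyGetD data ((s : Int) + n) 0 = data[s + n] := by
      have : ((s : Int) + n) = ((s + n : Nat) : Int) := by push_cast; ring
      rw [this, PySem.List.pyGetD_natCast, List.getD_eq_getElem _ _ hlt]
    have hnn : 0 ≤ ((data.drop s).take n).foldl (fun a b => a * 256 + b) acc :=
      pv_fold_nonneg _ _ hacc (fun b hb => (hbytes' b hb).1)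
    rw [hget, pv_bor_shift _ _ hnn hlast.1 hlast.2, htake, List.foldl_append]
    simp only [List.foldl_cons, List.foldl_nil, Prod.mk.injEq]
    exact ⟨trivial, by push_cast; ring⟩

-- ===== VERDICT (by name: the statement is the Claim_ definition above) =====
theorem read_ber_tag_len_spec : Claim_equal_read_ber_tag_len := by
  intro data off _ hpre
  unfold Spec_read_ber_tag_len read_ber_tag_len read_ber_tag_len_alt
  by_cases hend : (data.length : Int) ≤ off
  · simp [hend]
  · simp only [if_neg hend]
    rcases hpre with h | ⟨_, _, hlong⟩
    · exact absurd h hend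
    by_cases hb : PySem.Int.band (PySem.List.pyGetD data (off + 1) 0) 128 ≠ 0
    · simp only [if_pos hb]
      obtain ⟨hoff, hbound, hbytes⟩ := hlong hb
      set L := PySem.List.pyGetD data (off + 1) 0 with hL
      have hn0 : 0 ≤ PySem.Int.band L 127 := by
        rw [PySem.Int.band_comm]
        exact PySem.Int.band_nonneg_of_nonneg_left _ (by norm_num)
      obtain ⟨m, hm⟩ := Int.eq_ofNat_of_zero_le hn0
      obtain ⟨s, hs⟩ : ∃ s : Nat, off + 2 = (s : Int) :=
        Int.eq_ofNat_of_zero_le (by omega)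
      have hguard : ¬ ((data.length : Int) < off + 2 + PySem.Int.band L 127) := by omega
      simp only [if_neg hguard]
      have hslice : PySem.List.slice data (some (off + 2))
          (some (off + 2 + PySem.Int.band L 127)) = (data.drop s).take m := by
        rw [hs, hm, PySem.List.slice_natCast_add]
      have hsm : s + m ≤ data.length := by
        have := hbound
        rw [hs, hm] at this
        exact_mod_cast this
      have hbytes' : ∀ b ∈ (data.drop s).take m, 0 ≤ b ∧ b < 256 := by
        intro b hbm
        exact hbytes b (by rw [hslice]; exact hbm)
      rw [hm, hs, Int.toNat_natCast, pv_loop_eq data m s 0 le_rfl hsm hbytes',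
        PySem.List.slice_natCast_add]
    · simp [hb]
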